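-- pv_equiv track=rewrite | github.com/BhaskarVyas/ROBDD | honours_assn_robdd (1).py | var_sep
-- ===== SOURCE A (Python) =====
-- def var_sep(cube):
--     d = []
--     for c in cube:
--         b = []
--         a = list(c)
--         a.append(" ") #for error rectifying, wouldn't detect last char otherwise
--         for i in range(len(a)-1):
--             if a[i+1] == "'":
--                 l = "".join(a[i]+a[i+1])
--             elif a[i] == "'" or a[i] == " ":
--                 continue
--             else:
--                 l = a[i]
--             b.append(l)
--             for z in range(len(b)):
--                 for y in range(len(b)):
--                     x = y+z+1
--                     if x<len(b) and b[z] == b[x]: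
--                         b.pop(x)
--                         x = x-1
--         d.append(b)
--     return d
-- ===== SOURCE B (Python) =====
-- def var_sep(cube):
--     d = []
--     for c in cube:
--         toks = [x + y if y == "'" else x
--                 for x, y in zip(c, c[1:] + " ")
--                 if y == "'" or (x != "'" and x != " ")]
--         d.append(list(dict.fromkeys(toks)))
--     return d
-- ===== Notes on version B (the rewrite author's own statement) =====
-- stated objective: idiomatic
-- what changed: A's stateful lookahead scan over an index range with a quadratic nested-loop dedup re-run after every append is replaced by a zip-pair comprehension producing the token list in one pass, deduplicated once with dict.fromkeys (first-occurrence order).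
import Mathlib
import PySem

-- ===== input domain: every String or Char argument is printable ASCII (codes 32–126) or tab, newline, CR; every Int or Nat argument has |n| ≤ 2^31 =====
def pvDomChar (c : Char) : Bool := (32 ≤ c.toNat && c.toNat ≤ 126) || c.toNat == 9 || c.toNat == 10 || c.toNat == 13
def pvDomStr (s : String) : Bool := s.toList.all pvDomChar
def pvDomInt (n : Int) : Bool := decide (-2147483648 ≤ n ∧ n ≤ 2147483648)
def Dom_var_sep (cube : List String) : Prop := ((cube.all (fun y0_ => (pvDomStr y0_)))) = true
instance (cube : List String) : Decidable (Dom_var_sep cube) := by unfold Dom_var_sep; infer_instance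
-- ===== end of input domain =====

-- B replaces A's lookahead index scan with an interleaved quadratic dedup by a zip-pair
-- comprehension plus a single dict.fromkeys dedup (idiomatic; return value only).

-- ===== PORT A =====
-- the nested z/y dedup loop body: if x < len(b) and b[z] == b[x]: b.pop(x)
def pvDedupStep (z : Int) (b : List String) (y : Int) : List String :=
  if y + z + 1 < (b.length : Int) then
    match PySem.List.pyGet? b z, PySem.List.pyGet? b (y + z + 1) with
    | some u, some v =>
        if u = v then
          match PySem.List.pop? b (y + z + 1) with
          | some r => r.2
          | none => b
        else b
    | _, _ => b
  else b

-- for y in range(len(b)):  (range evaluated at inner-loop entry)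
def pvDedupInner (b : List String) (z : Int) : List String :=
  (PySem.List.pyRange 0 (b.length : Int) 1).foldl (pvDedupStep z) b

-- for z in range(len(b)):  (range evaluated once, after the append)
def pvDedup (b : List String) : List String :=
  (PySem.List.pyRange 0 (b.length : Int) 1).foldl pvDedupInner b

-- one iteration of A's outer 'for c in cube' body; a = list(c) + [" "]
def pvVarSepOne (c : String) : List String :=
  (PySem.List.pyRange 0 (((c.toList ++ [' ']).length : Int) - 1) 1).foldl (fun b i =>
    match PySem.List.pyGet? (c.toList ++ [' ']) (i+1), PySem.List.pyGet? (c.toList ++ [' ']) i with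
    | some ai1, some ai =>
        if ai1 = '\'' then pvDedup (b ++ [String.ofList [ai, ai1]])
        else if ai = '\'' ∨ ai = ' ' then b
        else pvDedup (b ++ [String.ofList [ai]])
    | _, _ => b) []

def var_sep (cube : List String) : List (List String) :=
  cube.foldl (fun d c => d ++ [pvVarSepOne c]) []

-- ===== PORT B =====
def pvKeep (p : Char × Char) : Bool :=
  p.2 = '\'' || (p.1 ≠ '\'' && p.1 ≠ ' ')

def pvTok (p : Char × Char) : String :=
  if p.2 = '\'' then String.ofList [p.1, p.2] else String.ofList [p.1]

-- toks = [x+y if y=="'" else x for x,y in zip(c, c[1:] + " ") if y=="'" or (x!="'" and x!=" ")]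
-- d.append(list(dict.fromkeys(toks)))
def pvVarSepAltOne (c : String) : List String :=
  PySem.List.dedup (((c.toList.zip (c.toList.drop 1 ++ [' '])).filter pvKeep).map pvTok)

def var_sep_alt (cube : List String) : List (List String) :=
  cube.foldl (fun d c => d ++ [pvVarSepAltOne c]) []

-- ===== PRECONDITION & SPEC =====
def Spec_var_sep (cube : List String) (out : List (List String)) : Prop := out = var_sep_alt cube
instance (cube : List String) (out : List (List String)) : Decidable (Spec_var_sep cube out) := by unfold Spec_var_sep; infer_instance

-- ===== CLAIM (what is proved, stated in full; the proofs are below) =====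
def Claim_equal_var_sep : Prop := ∀ (cube : List String), Dom_var_sep cube → Spec_var_sep cube (var_sep cube)

-- ===== LEMMAS AND PROOFS =====

-- a fold whose step fixes the start state fixes it throughout
theorem pvFoldlFixed {α β : Type} (f : β → α → β) (b : β) (l : List α)
    (h : ∀ y ∈ l, f b y = b) : l.foldl f b = b := by
  induction l with
  | nil => rfl
  | cons y l ih =>
      have hy : f b y = b := h y (by simp)
      rw [List.foldl_cons, hy]
      exact ih (fun y' hy' => h y' (by simp [hy']))

theorem pvEraseConcat {α : Type} (l : List α) (x : α) : (l ++ [x]).eraseIdx l.length = l := by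
  induction l with
  | nil => rfl
  | cons a l ih => simpa using ih

-- unfolds one dedup step when the guard holds and both reads succeed
theorem pvStep_unfold (s : List String) (z y : Int) (u v : String)
    (h : y + z + 1 < (s.length : Int))
    (hu : PySem.List.pyGet? s z = some u) (hv : PySem.List.pyGet? s (y + z + 1) = some v) :
    pvDedupStep z s y =
      if u = v then
        match PySem.List.pop? s (y + z + 1) with
        | some r => r.2
        | none => s
      else s := by
  unfold pvDedupStep
  rw [if_pos h, hu, hv]

-- one dedup-step does nothing on a duplicate-free state (indices nonneg)
theorem pvStep_id (b : List String) (z y : Int) (hb : b.Nodup)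
    (hz : 0 ≤ z) (hy : 0 ≤ y) : pvDedupStep z b y = b := by
  by_cases h : y + z + 1 < (b.length : Int)
  · rw [pvStep_unfold b z y _ _ h
        (PySem.List.pyGet?_eq_some_getElem b hz (by omega))
        (PySem.List.pyGet?_eq_some_getElem b (show (0:Int) ≤ y + z + 1 by omega) h)]
    rw [if_neg]
    intro he
    have := hb.getElem_inj_iff.mp he
    omega
  · unfold pvDedupStep
    rw [if_neg h]

-- inner loop does nothing on a duplicate-free state
theorem pvInner_id (b : List String) (z : Int) (hb : b.Nodup) (hz : 0 ≤ z) :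
    pvDedupInner b z = b := by
  unfold pvDedupInner
  exact pvFoldlFixed _ _ _ (fun y hy =>
    pvStep_id b z y hb hz (PySem.List.mem_pyRange_one.mp hy).1)

-- the whole dedup pass does nothing on a duplicate-free state
theorem pvDedup_id (b : List String) (hb : b.Nodup) : pvDedup b = b := by
  unfold pvDedup
  exact pvFoldlFixed _ _ _ (fun z hz =>
    pvInner_id b z hb (PySem.List.mem_pyRange_one.mp hz).1)

-- inner loop at an index other than the duplicate's does nothing on b ++ [t]
theorem pvInnerB'_id (b : List String) (t : String) (hb : b.Nodup) (k : Nat)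
    (hk : k < b.length) (hbk : b[k] = t) (z : Int) (hz0 : 0 ≤ z)
    (hzn : z < (b.length : Int)) (hzk : z.toNat ≠ k) :
    pvDedupInner (b ++ [t]) z = b ++ [t] := by
  unfold pvDedupInner
  apply pvFoldlFixed
  intro y hy
  have hy0 : 0 ≤ y := (PySem.List.mem_pyRange_one.mp hy).1
  by_cases h : y + z + 1 < ((b ++ [t]).length : Int)
  · have hlen : (b ++ [t]).length = b.length + 1 := by simp
    rw [pvStep_unfold _ z y _ _ h
        (PySem.List.pyGet?_eq_some_getElem _ hz0 (by simp; omega))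
        (PySem.List.pyGet?_eq_some_getElem _ (show (0:Int) ≤ y + z + 1 by omega) h)]
    rw [if_neg]
    intro he
    have hzb : z.toNat < b.length := by omega
    have hxb : (y + z + 1).toNat < b.length + 1 := by omega
    have hzx : z.toNat < (y + z + 1).toNat := by omega
    rw [List.getElem_append_left hzb] at he
    rcases Nat.lt_or_ge (y + z + 1).toNat b.length with hlt | hge
    · rw [List.getElem_append_left hlt] at he
      have := hb.getElem_inj_iff.mp he
      omega
    · have hxn : (y + z + 1).toNat = b.length := by omega
      rw [List.getElem_concat_length hxn] at he
      have : z.toNat = k := hb.getElem_inj_iff.mp (he.trans hbk.symm)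
      exact hzk this
  · unfold pvDedupStep
    rw [if_neg h]

-- inner loop at the first occurrence's index pops the appended duplicate
theorem pvInnerB'_k (b : List String) (t : String) (hb : b.Nodup) (k : Nat)
    (hk : k < b.length) (hbk : b[k] = t) :
    pvDedupInner (b ++ [t]) (k : Int) = b := by
  unfold pvDedupInner
  have hu : PySem.List.pyGet? (b ++ [t]) ((k : Int)) = some t := by
    rw [PySem.List.pyGet?_natCast, List.getElem?_eq_getElem (by simp; omega)]
    exact congrArg some (by rw [List.getElem_append_left hk]; exact hbk)
  have hlen2 : (((b ++ [t]).length : Nat) : Int) = (b.length : Int) + 1 := by simp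
  rw [hlen2,
      PySem.List.pyRange_one_append 0 ((b.length : Int) - k - 1) ((b.length : Int) + 1)
        (by omega) (by omega),
      List.foldl_append]
  have hseg1 : List.foldl (pvDedupStep (k : Int)) (b ++ [t])
      (PySem.List.pyRange 0 ((b.length : Int) - k - 1) 1) = b ++ [t] := by
    apply pvFoldlFixed
    intro y hy
    have hy' := PySem.List.mem_pyRange_one.mp hy
    rw [pvStep_unfold _ (k : Int) y t _ (by simp; omega) hu
        (PySem.List.pyGet?_eq_some_getElem _ (show (0:Int) ≤ y + k + 1 by omega) (by simp; omega))]
    rw [if_neg]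
    intro he
    have h2 : (y + (k : Int) + 1).toNat < b.length := by omega
    rw [List.getElem_append_left h2] at he
    have he' : b[(y + (k : Int) + 1).toNat]'h2 = b[k]'hk := by rw [hbk]; exact he.symm
    have := hb.getElem_inj_iff.mp he'
    omega
  rw [hseg1,
      PySem.List.pyRange_one_cons
        (show (b.length : Int) - k - 1 < (b.length : Int) + 1 by omega),
      List.foldl_cons]
  have hv : PySem.List.pyGet? (b ++ [t]) (((b.length : Int) - k - 1) + k + 1) = some t := by
    rw [show ((b.length : Int) - k - 1) + (k : Int) + 1 = ((b.length : Nat) : Int) by ring,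
        PySem.List.pyGet?_natCast, List.getElem?_eq_getElem (by simp)]
    exact congrArg some (List.getElem_concat_length rfl _)
  have hmid : pvDedupStep (k : Int) (b ++ [t]) ((b.length : Int) - k - 1) = b := by
    rw [pvStep_unfold _ (k : Int) ((b.length : Int) - k - 1) t t (by simp; omega) hu hv]
    rw [if_pos rfl,
        show ((b.length : Int) - k - 1) + (k : Int) + 1 = ((b.length : Nat) : Int) by ring]
    have hp := PySem.List.pop?_natCast (b ++ [t]) b.length (by simp)
    rw [hp]
    exact pvEraseConcat b t
  rw [hmid]
  apply pvFoldlFixed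
  intro y hy
  have hy' := PySem.List.mem_pyRange_one.mp hy
  unfold pvDedupStep
  rw [if_neg (by omega)]

-- the dedup pass removes an appended duplicate
theorem pvDedup_dup (b : List String) (t : String) (hb : b.Nodup) (ht : t ∈ b) :
    pvDedup (b ++ [t]) = b := by
  obtain ⟨k, hk, hbk⟩ := List.getElem_of_mem ht
  unfold pvDedup
  have hlen2 : (((b ++ [t]).length : Nat) : Int) = (b.length : Int) + 1 := by simp
  rw [hlen2,
      PySem.List.pyRange_one_append 0 (k : Int) ((b.length : Int) + 1) (by omega) (by omega),
      List.foldl_append]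
  have hseg1 : List.foldl pvDedupInner (b ++ [t]) (PySem.List.pyRange 0 (k : Int) 1) = b ++ [t] := by
    apply pvFoldlFixed
    intro z hz
    have hz' := PySem.List.mem_pyRange_one.mp hz
    exact pvInnerB'_id b t hb k hk hbk z hz'.1 (by omega) (by omega)
  rw [hseg1,
      PySem.List.pyRange_one_cons (show (k : Int) < (b.length : Int) + 1 by omega),
      List.foldl_cons,
      pvInnerB'_k b t hb k hk hbk]
  exact pvFoldlFixed _ _ _ (fun z hz =>
    pvInner_id b z hb (by have := (PySem.List.mem_pyRange_one.mp hz).1; omega))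

-- the dedup pass after an append is exactly Python's set-add
theorem pvDedup_key (b : List String) (t : String) (hb : b.Nodup) :
    pvDedup (b ++ [t]) = PySem.Set.add b t := by
  have hadd : PySem.Set.add b t = if b.contains t then b else b ++ [t] := rfl
  by_cases ht : t ∈ b
  · rw [pvDedup_dup b t hb ht, hadd, if_pos (by simpa using ht)]
  · have hnd : (b ++ [t]).Nodup := by
      simp [List.nodup_append, hb]
      exact fun a ha he => ht (he ▸ ha)
    rw [pvDedup_id _ hnd, hadd, if_neg (by simpa using ht)]

theorem pvSetAdd_nodup (b : List String) (t : String) (hb : b.Nodup) :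
    (PySem.Set.add b t).Nodup := by
  have hadd : PySem.Set.add b t = if b.contains t then b else b ++ [t] := rfl
  rw [hadd]
  split_ifs with hc
  · exact hb
  · have ht : t ∉ b := by simpa using hc
    simp [List.nodup_append, hb]
    exact fun a ha he => ht (he ▸ ha)

-- A's per-token step, rephrased on a (char, lookahead) pair
def pvStepA (b : List String) (p : Char × Char) : List String :=
  if p.2 = '\'' then pvDedup (b ++ [String.ofList [p.1, p.2]])
  else if p.1 = '\'' ∨ p.1 = ' ' then b
  else pvDedup (b ++ [String.ofList [p.1]])

-- an index-range fold is a fold over the list the indices address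
theorem pvFoldRange {α β : Type} (L : List α) (f : β → Int → β) (g : β → α → β)
    (h : ∀ (bb : β) (i : Nat) (hi : i < L.length), f bb (i : Int) = g bb L[i]) :
    ∀ init, (PySem.List.pyRange 0 (L.length : Int) 1).foldl f init = L.foldl g init := by
  have key : ∀ (n : Nat), n ≤ L.length → ∀ init,
      (PySem.List.pyRange 0 (n : Int) 1).foldl f init = (L.take n).foldl g init := by
    intro n
    induction n with
    | zero => intro _ init; simp [PySem.List.pyRange_one_eq_nil]
    | succ m ih =>
        intro hn init
        have hm : m < L.length := by omega
        have hcast : ((m + 1 : Nat) : Int) = (m : Int) + 1 := by push_cast; ring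
        rw [hcast, PySem.List.pyRange_one_succ_right (by omega), List.foldl_append,
            ih (by omega), List.take_add_one, List.getElem?_eq_getElem hm]
        simp only [Option.toList_some, List.foldl_append, List.foldl_cons, List.foldl_nil]
        exact h _ m hm
  intro init
  simpa [List.take_length] using key L.length le_rfl init

-- A's per-cube loop equals the fold of pvStepA over the zip pairs
theorem pvVarSepOne_eq_fold (c : String) :
    pvVarSepOne c = (c.toList.zip (c.toList.drop 1 ++ [' '])).foldl pvStepA [] := by
  unfold pvVarSepOne
  generalize c.toList = cs
  have hLlen : (cs.zip (cs.drop 1 ++ [' '])).length = cs.length := by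
    simp [List.length_zip]
    omega
  have hcast : (((cs ++ [' ']).length : Int)) - 1 = ((cs.zip (cs.drop 1 ++ [' '])).length : Int) := by
    have h1 : (cs ++ [' ']).length = cs.length + 1 := by simp
    rw [h1, hLlen]
    push_cast
    ring
  rw [hcast]
  refine pvFoldRange _ _ pvStepA ?_ []
  intro bb i hi
  have hi' : i < cs.length := by omega
  have hc1 : ((i : Int) + 1) = ((i + 1 : Nat) : Int) := by push_cast; ring
  have hg1 : PySem.List.pyGet? (cs ++ [' ']) ((i : Int) + 1) =
      some ((cs ++ [' '])[i + 1]'(by simp; omega)) := by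
    rw [hc1, PySem.List.pyGet?_natCast, List.getElem?_eq_getElem (by simp; omega)]
  have hg2 : PySem.List.pyGet? (cs ++ [' ']) (i : Int) =
      some ((cs ++ [' '])[i]'(by simp; omega)) := by
    rw [PySem.List.pyGet?_natCast, List.getElem?_eq_getElem (by simp; omega)]
  rw [hg1, hg2]
  have e1 : (cs ++ [' '])[i]'(by simp; omega) = cs[i] := List.getElem_append_left hi'
  have e2 : (cs ++ [' '])[i + 1]'(by simp; omega) = (cs.drop 1 ++ [' '])[i]'(by simp; omega) := by
    rcases Nat.lt_or_ge (i + 1) cs.length with hlt | hge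
    · rw [List.getElem_append_left hlt,
          List.getElem_append_left (show i < (cs.drop 1).length by simp; omega),
          List.getElem_drop]
      simp [Nat.add_comm]
    · have hx : i + 1 = cs.length := by omega
      rw [List.getElem_concat_length hx,
          List.getElem_append_right (show (cs.drop 1).length ≤ i by simp; omega)]
      simp
  rw [e1, e2]
  show _ = pvStepA bb ((cs.zip (cs.drop 1 ++ [' ']))[i])
  rw [List.getElem_zip]
  rfl

-- folding pvStepA from a duplicate-free state is filter+map then set-adds
theorem pvFoldStepA (Z : List (Char × Char)) :
    ∀ b, b.Nodup → Z.foldl pvStepA b = ((Z.filter pvKeep).map pvTok).foldl PySem.Set.add b := by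
  induction Z with
  | nil => intro b _; rfl
  | cons p Z ih =>
      intro b hb
      by_cases h2 : p.2 = '\''
      · have hk : pvKeep p = true := by simp [pvKeep, h2]
        have hstep : pvStepA b p = PySem.Set.add b (pvTok p) := by
          simp only [pvStepA, pvTok, if_pos h2]
          exact pvDedup_key b _ hb
        rw [List.foldl_cons, hstep, List.filter_cons_of_pos hk, List.map_cons, List.foldl_cons]
        exact ih _ (pvSetAdd_nodup b _ hb)
      · by_cases h1 : p.1 = '\'' ∨ p.1 = ' '
        · have hk : ¬ (pvKeep p = true) := by
            simp [pvKeep, h2]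
            rcases h1 with h | h <;> simp [h]
          have hstep : pvStepA b p = b := by
            simp only [pvStepA, if_neg h2, if_pos h1]
          rw [List.foldl_cons, hstep, List.filter_cons_of_neg hk]
          exact ih _ hb
        · have h1' := not_or.mp h1
          have hk : pvKeep p = true := by simp [pvKeep, h2, h1'.1, h1'.2]
          have hstep : pvStepA b p = PySem.Set.add b (pvTok p) := by
            simp only [pvStepA, pvTok, if_neg h2, if_neg h1]
            exact pvDedup_key b _ hb
          rw [List.foldl_cons, hstep, List.filter_cons_of_pos hk, List.map_cons, List.foldl_cons]
          exact ih _ (pvSetAdd_nodup b _ hb)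

theorem pvOne_eq (c : String) : pvVarSepOne c = pvVarSepAltOne c := by
  rw [pvVarSepOne_eq_fold, pvFoldStepA _ [] List.nodup_nil]
  unfold pvVarSepAltOne
  rw [PySem.List.dedup_eq_ofList, PySem.Set.ofList_eq_foldl]

-- ===== VERDICT (by name: the statement is the Claim_ definition above) =====
theorem var_sep_spec : Claim_equal_var_sep := by
  intro cube _
  unfold Spec_var_sep var_sep var_sep_alt
  rw [PySem.List.foldl_append_singleton_eq_map, PySem.List.foldl_append_singleton_eq_map]
  simp only [List.nil_append]
  exact List.map_congr_left (fun c _ => pvOne_eq c)
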